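-- pv_equiv track=rewrite | github.com/cloud-act-ai/cloudact-mono-repo | 03-data-pipeline-service/src/app/middleware/scope_enforcement.py | expand_wildcard_scope
-- ===== SOURCE A (Python) =====
-- def expand_wildcard_scope(scope: str, required_scope: str) -> bool:
--     """
--     Check if a wildcard scope matches a required scope.
--
--     Examples:
--         - "pipelines:*" matches "pipelines:execute"
--         - "org:*" matches "org:read"
--         - "*" matches anything
--     """
--     if scope == "*":
--         return True
--
--     if "*" not in scope:
--         return scope == required_scope
--
--     # Handle wildcard patterns like "pipelines:*"
--     scope_parts = scope.split(":")
--     required_parts = required_scope.split(":")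
--
--     if len(scope_parts) != len(required_parts):
--         return False
--
--     for scope_part, required_part in zip(scope_parts, required_parts):
--         if scope_part == "*":
--             continue
--         if scope_part != required_part:
--             return False
--
--     return True
-- ===== SOURCE B (Python) =====
-- def expand_wildcard_scope(scope: str, required_scope: str) -> bool:
--     """Uniform recursive segment matcher: '*' as a whole segment matches any
--     segment; one recursion replaces A's membership test, equality fallback,
--     length check and zip loop."""
--     if scope == "*":
--         return True
--
--     def match(sp, rp):
--         if not sp or not rp:
--             return not sp and not rp
--         return (sp[0] == "*" or sp[0] == rp[0]) and match(sp[1:], rp[1:])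
--
--     return match(scope.split(":"), required_scope.split(":"))
-- ===== Notes on version B (the rewrite author's own statement) =====
-- stated objective: simpler
-- what changed: A's four code paths (membership test for '*', plain string-equality fallback, separate length check, zip loop with continue/early-return) are replaced by one uniform recursive segment matcher over the two split lists, in which a '*' segment matches any segment; only the scope == '*' special case remains.
import Mathlib
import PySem

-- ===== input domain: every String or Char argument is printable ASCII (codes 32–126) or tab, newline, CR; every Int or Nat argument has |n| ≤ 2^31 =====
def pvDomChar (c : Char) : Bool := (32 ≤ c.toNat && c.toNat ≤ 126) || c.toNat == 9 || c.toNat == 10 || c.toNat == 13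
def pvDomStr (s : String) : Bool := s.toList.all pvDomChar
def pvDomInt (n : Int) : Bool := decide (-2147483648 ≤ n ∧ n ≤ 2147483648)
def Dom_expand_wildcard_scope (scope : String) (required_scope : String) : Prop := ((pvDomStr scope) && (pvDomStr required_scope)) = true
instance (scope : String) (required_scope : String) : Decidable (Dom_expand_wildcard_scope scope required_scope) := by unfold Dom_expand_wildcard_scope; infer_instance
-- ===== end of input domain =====

-- B replaces A's membership test, equality fallback, length check and zip loop
-- by one uniform recursive segment matcher (objective: simpler; not faster).

-- ===== PORT A =====
-- A's for-loop over zip(scope_parts, required_parts) with continue / early False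
def pvLoopA : List (List Char × List Char) → Bool
  | [] => true
  | (s, r) :: rest =>
    if s = ['*'] then pvLoopA rest
    else if s ≠ r then false
    else pvLoopA rest

def expand_wildcard_scope (scope : String) (required_scope : String) : Bool :=
  if scope == "*" then true
  else if PySem.Str.isIn "*" scope = false then scope == required_scope
  else
    let scope_parts := PySem.Chars.splitOn scope.toList ":".toList
    let required_parts := PySem.Chars.splitOn required_scope.toList ":".toList
    if scope_parts.length ≠ required_parts.length then false
    else pvLoopA (scope_parts.zip required_parts)

-- ===== PORT B =====
-- Source B's recursive match(sp, rp)
def pvMatchB : List (List Char) → List (List Char) → Bool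
  | [], [] => true
  | s :: ss, r :: rs => (s == ['*'] || s == r) && pvMatchB ss rs
  | _, _ => false

def expand_wildcard_scope_alt (scope : String) (required_scope : String) : Bool :=
  if scope == "*" then true
  else pvMatchB (PySem.Chars.splitOn scope.toList ":".toList)
               (PySem.Chars.splitOn required_scope.toList ":".toList)

-- ===== PRECONDITION & SPEC =====
def Spec_expand_wildcard_scope (scope : String) (required_scope : String) (out : Bool) : Prop := out = expand_wildcard_scope_alt scope required_scope
instance (scope : String) (required_scope : String) (out : Bool) : Decidable (Spec_expand_wildcard_scope scope required_scope out) := by unfold Spec_expand_wildcard_scope; infer_instance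

-- ===== CLAIM (what is proved, stated in full; the proofs are below) =====
def Claim_equal_expand_wildcard_scope : Prop := ∀ (scope : String) (required_scope : String), Dom_expand_wildcard_scope scope required_scope → Spec_expand_wildcard_scope scope required_scope (expand_wildcard_scope scope required_scope)

-- ===== LEMMAS AND PROOFS =====

-- a simple structural characterisation of splitOn on a one-char separator
def pvSc (c : Char) : List Char → List (List Char)
  | [] => [[]]
  | x :: xs =>
    match pvSc c xs with
    | [] => []
    | h :: t => if x = c then [] :: h :: t else (x :: h) :: t

def pvPre (p : List Char) : List (List Char) → List (List Char)
  | [] => [p]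
  | h :: t => (p ++ h) :: t

lemma pvSc_ne_nil (c : Char) (l : List Char) : pvSc c l ≠ [] := by
  induction l with
  | nil => simp [pvSc]
  | cons x xs ih =>
    simp only [pvSc]
    rcases h : pvSc c xs with _ | ⟨a, b⟩
    · exact absurd h ih
    · split
      · simp_all
      · split <;> simp

lemma pvGo_eq (c : Char) (l cur : List Char) (acc : List (List Char)) (fuel : Nat)
    (h : l.length < fuel) :
    PySem.Chars.splitOn.go [c] fuel l cur acc = acc.reverse ++ pvPre cur.reverse (pvSc c l) := by
  induction l generalizing fuel cur acc with
  | nil =>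
    cases fuel with
    | zero => omega
    | succ f => simp [PySem.Chars.splitOn.go, pvSc, pvPre]
  | cons x xs ih =>
    cases fuel with
    | zero => omega
    | succ f =>
      rw [PySem.Chars.splitOn.go]
      by_cases hx : x = c
      · have hp : List.isPrefixOf [c] (x :: xs) = true := by simp [List.isPrefixOf, hx]
        rw [hp, if_pos rfl]
        simp only [List.length_cons, Nat.add_lt_add_iff_right] at h
        rw [show List.drop [c].length (x :: xs) = xs by simp]
        rw [ih [] (cur.reverse :: acc) f h]
        rcases hs : pvSc c xs with _ | ⟨a, b⟩
        · exact absurd hs (pvSc_ne_nil c xs)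
        · simp [pvSc, hs, hx, pvPre]
      · have hp : List.isPrefixOf [c] (x :: xs) = false := by
          simp [List.isPrefixOf]; exact fun hc => absurd hc.symm hx
        rw [hp]
        simp only [Bool.false_eq_true, if_false]
        simp only [List.length_cons, Nat.add_lt_add_iff_right] at h
        rw [ih (x :: cur) acc f h]
        rcases hs : pvSc c xs with _ | ⟨a, b⟩
        · exact absurd hs (pvSc_ne_nil c xs)
        · simp [pvSc, hs, hx, pvPre]

lemma pvSplitOn_eq_sc (c : Char) (l : List Char) :
    PySem.Chars.splitOn l [c] = pvSc c l := by
  rw [PySem.Chars.splitOn, pvGo_eq c l [] [] (l.length + 1) (by omega)]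
  rcases hs : pvSc c l with _ | ⟨a, b⟩
  · exact absurd hs (pvSc_ne_nil c l)
  · simp [pvPre]

-- join round-trip: pvSc is injective
def pvJc (c : Char) : List (List Char) → List Char
  | [] => []
  | [x] => x
  | x :: xs => x ++ c :: pvJc c xs

lemma pvJc_sc (c : Char) (l : List Char) : pvJc c (pvSc c l) = l := by
  induction l with
  | nil => simp [pvSc, pvJc]
  | cons x xs ih =>
    simp only [pvSc]
    rcases hs : pvSc c xs with _ | ⟨a, b⟩
    · exact absurd hs (pvSc_ne_nil c xs)
    · rw [hs] at ih
      by_cases hx : x = c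
      · subst hx
        cases b <;> simp_all [pvJc]
      · simp only [if_neg hx]
        cases b <;> simp_all [pvJc]

lemma pvSc_inj (c : Char) (a b : List Char) (h : pvSc c a = pvSc c b) : a = b := by
  have := congrArg (pvJc c) h
  rwa [pvJc_sc, pvJc_sc] at this

-- every char of every piece is a char of the source
lemma pvSc_mem_chars (c : Char) (l x : List Char) (hx : x ∈ pvSc c l) (ch : Char)
    (hch : ch ∈ x) : ch ∈ l := by
  induction l generalizing x with
  | nil => simp [pvSc] at hx; subst hx; simp at hch
  | cons y ys ih =>
    simp only [pvSc] at hx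
    rcases hs : pvSc c ys with _ | ⟨a, b⟩
    · exact absurd hs (pvSc_ne_nil c ys)
    · rw [hs] at hx
      have hx2 : x ∈ (if y = c then [] :: a :: b else (y :: a) :: b) := hx
      by_cases hy : y = c
      · rw [if_pos hy] at hx2
        rcases List.mem_cons.mp hx2 with h1 | h1
        · subst h1; simp at hch
        · exact List.mem_cons_of_mem _ (ih x (by rw [hs]; exact h1) hch)
      · rw [if_neg hy] at hx2
        rcases List.mem_cons.mp hx2 with h1 | h1
        · subst h1
          rcases List.mem_cons.mp hch with h2 | h2
          · simp [h2]
          · exact List.mem_cons_of_mem _ (ih a (by rw [hs]; simp) h2)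
        · exact List.mem_cons_of_mem _ (ih x (by rw [hs]; exact List.mem_cons_of_mem _ h1) hch)

-- B's matcher = A's length check + zip loop
lemma pvMatchB_eq_zip (sp rp : List (List Char)) :
    pvMatchB sp rp = if sp.length = rp.length then pvLoopA (sp.zip rp) else false := by
  induction sp generalizing rp with
  | nil => cases rp <;> simp [pvMatchB, pvLoopA]
  | cons s ss ih =>
    cases rp with
    | nil => simp [pvMatchB]
    | cons r rs =>
      simp only [pvMatchB, List.zip_cons_cons, pvLoopA, List.length_cons, ih rs,
        Nat.add_right_cancel_iff]
      by_cases hs : s = ['*']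
      · simp [hs]
      · by_cases hr : s = r <;> simp [hs, hr]

-- with no "*" segment, B's matcher is list equality
lemma pvMatchB_no_star (sp rp : List (List Char)) (h : ∀ x ∈ sp, x ≠ ['*']) :
    pvMatchB sp rp = decide (sp = rp) := by
  induction sp generalizing rp with
  | nil => cases rp <;> simp [pvMatchB]
  | cons s ss ih =>
    cases rp with
    | nil => simp [pvMatchB]
    | cons r rs =>
      have hs : s ≠ ['*'] := h s List.mem_cons_self
      simp only [pvMatchB, ih rs (fun x hx => h x (List.mem_cons_of_mem _ hx))]
      by_cases hr : s = r <;> simp [hs, hr]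

-- ===== VERDICT (by name: the statement is the Claim_ definition above) =====
theorem expand_wildcard_scope_spec : Claim_equal_expand_wildcard_scope := by
  unfold Claim_equal_expand_wildcard_scope Spec_expand_wildcard_scope
  intro scope required_scope _
  unfold expand_wildcard_scope expand_wildcard_scope_alt
  by_cases h1 : scope == "*"
  · simp [h1]
  · simp only [h1, Bool.false_eq_true, if_false]
    by_cases h2 : PySem.Str.isIn "*" scope = false
    · -- no '*' anywhere in scope: A compares the strings, B matches the split pieces
      simp only [h2]
      have h2' : ¬ ('*' ∈ scope.toList) := by
        rw [PySem.Str.isIn_eq] at h2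
        rw [show ("*".toList : List Char) = ['*'] from rfl, PySem.Chars.isIn_eq_false_iff] at h2
        exact fun hm => h2 ((List.singleton_infix_iff '*' scope.toList).mpr hm)
      have hnostar : ∀ x ∈ PySem.Chars.splitOn scope.toList ":".toList, x ≠ ['*'] := by
        intro x hx hxeq
        apply h2'
        refine pvSc_mem_chars ':' scope.toList x ?_ '*' ?_
        · rw [show (":".toList : List Char) = [':'] from rfl, pvSplitOn_eq_sc] at hx
          exact hx
        · rw [hxeq]; simp
      rw [pvMatchB_no_star _ _ hnostar]
      rw [show (":".toList : List Char) = [':'] from rfl, pvSplitOn_eq_sc, pvSplitOn_eq_sc]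
      by_cases heq : scope = required_scope
      · simp [heq]
      · have : pvSc ':' scope.toList ≠ pvSc ':' required_scope.toList := by
          intro hc
          exact heq (String.toList_inj.mp (pvSc_inj ':' _ _ hc))
        simp [heq, this]
    · -- scope contains '*': A's length check + zip loop = B's matcher
      simp only [h2]
      rw [pvMatchB_eq_zip]
      split <;> simp_all
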